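-- pv_equiv track=rewrite | github.com/Ace91Ace/GFG | Difficulty: Medium/Substrings of length k with k-1 distinct elements/substrings-of-length-k-with-k1-distinct-elements.py | substrCount
-- ===== SOURCE A (Python) =====
-- def substrCount(s, k):
--     # code here
--     freq = {}
--     l, res = 0, 0
--
--     for r in range(len(s)):
--         freq[s[r]] = freq.get(s[r], 0)+1
--         ln = r-l+1
--
--         if ln < k:
--             continue
--         elif ln > k:
--             freq[s[l]] -= 1
--             if freq[s[l]] == 0:
--                 del freq[s[l]]
--             l += 1
--         if len(freq) == k-1:
--             res += 1
--     return res
-- ===== SOURCE B (Python) =====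
-- def substrCount(s, k):
--     if k <= 0:
--         return 0
--     res = 0
--     for i in range(len(s) - k + 1):
--         if len(set(s[i:i+k])) == k - 1:
--             res += 1
--     return res
-- ===== Notes on version B (the rewrite author's own statement) =====
-- stated objective: simpler
-- what changed: Replaced the incremental sliding-window frequency dict (add right char, evict left char, delete zero counts) with a direct loop over window start indices recomputing each window's distinct-character count via len(set(slice)); nonpositive k (no windows) returns 0 immediately.
import Mathlib
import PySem

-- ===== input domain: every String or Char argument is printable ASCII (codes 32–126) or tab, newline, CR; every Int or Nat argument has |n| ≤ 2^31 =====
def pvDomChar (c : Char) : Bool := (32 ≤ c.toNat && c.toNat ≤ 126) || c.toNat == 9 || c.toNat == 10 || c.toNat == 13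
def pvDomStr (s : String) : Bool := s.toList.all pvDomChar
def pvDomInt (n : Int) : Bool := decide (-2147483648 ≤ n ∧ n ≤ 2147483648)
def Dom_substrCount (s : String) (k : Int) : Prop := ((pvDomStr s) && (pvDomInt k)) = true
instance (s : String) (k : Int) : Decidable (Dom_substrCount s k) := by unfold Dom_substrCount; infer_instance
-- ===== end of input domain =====

-- B replaces A's incremental sliding-window frequency dict by a direct loop over window
-- start indices that recomputes each window's distinct-character count from a slice (objective: simpler).


-- ===== PORT A =====
-- loop body of A's 'for r in range(len(s))'; state = (freq, l, res).
-- s[r] and s[l] are always in range when A reads them (0 ≤ l ≤ r < len(s)), and freq[s[l]]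
-- is always a present key there, so pyGetD / Dict.getD are exact at those reads.
def substrCountStep (cs : List Char) (k : Int) (st : PySem.Dict Char Int × Int × Int) (r : Int) :
    PySem.Dict Char Int × Int × Int :=
  let freq0 := st.1
  let l := st.2.1
  let res := st.2.2
  let c := PySem.List.pyGetD cs r ' '
  let freq1 := freq0.insert c (freq0.getD c 0 + 1)
  let ln := r - l + 1
  if ln < k then (freq1, l, res)
  else
    let st2 :=
      if ln > k then
        let cl := PySem.List.pyGetD cs l ' '
        let freq2 := freq1.insert cl (freq1.getD cl 0 - 1)
        let freq3 := if freq2.getD cl 0 == 0 then freq2.erase cl else freq2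
        (freq3, l + 1)
      else (freq1, l)
    if ((st2.1.size : Int) == k - 1) then (st2.1, st2.2, res + 1) else (st2.1, st2.2, res)

def substrCount (s : String) (k : Int) : Int :=
  ((PySem.List.pyRange 0 (PySem.Str.len s) 1).foldl (substrCountStep s.toList k)
    (PySem.Dict.empty, 0, 0)).2.2

-- ===== PORT B =====
def substrCount_alt (s : String) (k : Int) : Int :=
  if k ≤ 0 then 0
  else (PySem.List.pyRange 0 (PySem.Str.len s - k + 1) 1).foldl
    (fun res i =>
      if (PySem.Set.len (PySem.Set.ofList (PySem.List.slice s.toList (some i) (some (i + k)))) == k - 1)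
      then res + 1 else res) 0

-- ===== PRECONDITION & SPEC =====
-- A is total (it returns on every input), so no Pre_ is defined.
def Spec_substrCount (s : String) (k : Int) (out : Int) : Prop := out = substrCount_alt s k
instance (s : String) (k : Int) (out : Int) : Decidable (Spec_substrCount s k out) := by unfold Spec_substrCount; infer_instance

-- ===== CLAIM (what is proved, stated in full; the proofs are below) =====
def Claim_equal_substrCount : Prop := ∀ (s : String) (k : Int), Dom_substrCount s k → Spec_substrCount s k (substrCount s k)

-- ===== LEMMAS AND PROOFS =====

def pvInv (d : PySem.Dict Char Int) (L : List Char) : Prop :=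
  d.keys.Nodup ∧ (∀ c, d.getD c 0 = (L.count c : Int)) ∧
    (∀ c, d.contains c = true ↔ 0 < L.count c)

theorem pvInv_empty : pvInv PySem.Dict.empty [] := by
  refine ⟨by simp [PySem.Dict.keys, PySem.Dict.empty], fun c => by simp [pysem], fun c => by simp [pysem]⟩

theorem pvInv_add {d : PySem.Dict Char Int} {L : List Char} (h : pvInv d L) (c : Char) :
    pvInv (d.insert c (d.getD c 0 + 1)) (L ++ [c]) := by
  obtain ⟨hnd, hget, hcon⟩ := h
  refine ⟨PySem.Dict.nodup_keys_insert _ _ _ hnd, fun c' => ?_, fun c' => ?_⟩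
  · rw [PySem.Dict.getD_insert]
    by_cases hc : c' = c
    · subst hc; rw [hget]; simp [List.count_append]
    · simp [hc, hget, List.count_append, Ne.symm hc]
  · rw [PySem.Dict.contains_insert]
    by_cases hc : c' = c
    · subst hc; simp [List.count_append]
    · simp [hc, hcon, List.count_append, Ne.symm hc]

theorem erase_get? {ν : Type} (d : PySem.Dict Char ν) (a b : Char) :
    (d.erase a).get? b = if b = a then none else d.get? b := by
  obtain ⟨items⟩ := d
  simp only [PySem.Dict.erase, PySem.Dict.get?]
  induction items with
  | nil => simp
  | cons p rest ih =>
    by_cases hpa : p.1 = a <;> by_cases hab : b = a <;>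
      simp_all [List.find?, beq_iff_eq] <;> aesop

theorem erase_keys {ν : Type} (d : PySem.Dict Char ν) (a : Char) :
    (d.erase a).keys = d.keys.filter (fun x => !(x == a)) := by
  obtain ⟨items⟩ := d
  simp [PySem.Dict.erase, PySem.Dict.keys, List.filter_map]
  rfl

theorem pvInv_remove {d : PySem.Dict Char Int} {c : Char} {L : List Char}
    (h : pvInv d (c :: L)) :
    pvInv (if (d.insert c (d.getD c 0 - 1)).getD c 0 == 0
           then (d.insert c (d.getD c 0 - 1)).erase c
           else d.insert c (d.getD c 0 - 1)) L := by
  obtain ⟨hnd, hget, hcon⟩ := h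
  have hgd : ∀ c', (d.insert c (d.getD c 0 - 1)).getD c' 0 = (L.count c' : Int) := by
    intro c'
    rw [PySem.Dict.getD_insert]
    by_cases hc : c' = c
    · subst hc; simp [hget]
    · simp [hc, hget, Ne.symm hc]
  by_cases hz : (d.insert c (d.getD c 0 - 1)).getD c 0 == 0
  · have hz' : (L.count c : Int) = 0 := by rw [← hgd c]; exact eq_of_beq hz
    simp only [hz, if_pos]
    refine ⟨?_, fun c' => ?_, fun c' => ?_⟩
    · rw [erase_keys]
      exact (PySem.Dict.nodup_keys_insert _ _ _ hnd).filter _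
    · rw [PySem.Dict.getD_eq_get?_getD, erase_get?]
      by_cases hc : c' = c
      · subst hc; simp; omega
      · simp [hc]
        rw [← PySem.Dict.getD_eq_get?_getD, hgd]
    · rw [PySem.Dict.contains_eq_isSome_get?, erase_get?]
      by_cases hc : c' = c
      · subst hc
        have h0 : L.count c' = 0 := by exact_mod_cast hz'
        simp [List.count_eq_zero.1 h0]
      · simp [hc]
        rw [← PySem.Dict.contains_eq_isSome_get?]
        rw [PySem.Dict.contains_insert]
        simp [hc, hcon, Ne.symm hc]
  · have hz' : (L.count c : Int) ≠ 0 := by rw [← hgd c]; simpa using hz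
    simp only [hz, if_neg, Bool.not_eq_true]
    refine ⟨PySem.Dict.nodup_keys_insert _ _ _ hnd, hgd, fun c' => ?_⟩
    rw [PySem.Dict.contains_insert]
    by_cases hc : c' = c
    · subst hc
      have h0 : L.count c' ≠ 0 := by exact_mod_cast hz'
      simp [List.count_pos_iff.1 (Nat.pos_of_ne_zero h0)]
    · simp [hc, hcon, Ne.symm hc]

theorem pvInv_size {d : PySem.Dict Char Int} {L : List Char} (h : pvInv d L) :
    d.size = (PySem.List.dedup L).length := by
  obtain ⟨hnd, hget, hcon⟩ := h
  have hmem : ∀ a, a ∈ d.keys ↔ a ∈ PySem.List.dedup L := by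
    intro a
    rw [← PySem.Dict.contains_iff_mem_keys, hcon]
    simp [PySem.List.dedup, PySem.Set.mem_ofList, List.count_pos_iff]
  have hperm : d.keys.Perm (PySem.List.dedup L) :=
    (List.perm_ext_iff_of_nodup hnd (PySem.Set.nodup_ofList L)).2 hmem
  have : d.keys.length = (PySem.List.dedup L).length := hperm.length_eq
  simp only [PySem.Dict.size, PySem.Dict.keys, List.length_map] at this ⊢
  exact this

def pvWin (cs : List Char) (k' j : Nat) : List Char := (cs.take j).drop (j - k')

def pvGood (cs : List Char) (k' : Nat) (r : Nat) : Bool :=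
  (PySem.List.dedup (pvWin cs k' (r + 1))).length == k' - 1

def pvCnt (cs : List Char) (k' j : Nat) : Int :=
  ((List.range j).countP (fun r => decide (k' ≤ r + 1) && pvGood cs k' r) : Int)

theorem pvCnt_succ (cs : List Char) (k' j : Nat) :
    pvCnt cs k' (j + 1) =
      pvCnt cs k' j + (if k' ≤ j + 1 ∧ pvGood cs k' j = true then 1 else 0) := by
  unfold pvCnt
  rw [List.range_succ, List.countP_append]
  by_cases h1 : k' ≤ j + 1 <;> by_cases h2 : pvGood cs k' j = true <;>
    simp [h1, h2]

theorem pvCond_eq {cs : List Char} {k' j : Nat} {d : PySem.Dict Char Int}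
    (h : pvInv d (pvWin cs k' (j + 1))) (hk1 : 1 ≤ k') :
    ((d.size : Int) == (k' : Int) - 1) = pvGood cs k' j := by
  rw [pvInv_size h]
  unfold pvGood
  by_cases hE : (PySem.List.dedup (pvWin cs k' (j + 1))).length = k' - 1 <;>
    simp [hE] <;> omega

theorem pvWin_succ (cs : List Char) (k' j : Nat) (hj : j < cs.length) :
    pvWin cs k' j ++ [cs[j]] = (cs.take (j + 1)).drop (j - k') := by
  unfold pvWin
  rw [List.take_add_one, List.getElem?_eq_getElem hj]
  rw [List.drop_append_of_le_length (by simp; omega)]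
  rfl

theorem pvLoopA (cs : List Char) (k : Int) (k' : Nat) (hk : k = (k' : Int)) (hk1 : 1 ≤ k') :
    ∀ j : Nat, j ≤ cs.length →
    ∃ freq : PySem.Dict Char Int,
      (PySem.List.pyRange 0 (j : Int) 1).foldl (substrCountStep cs k) (PySem.Dict.empty, 0, 0)
        = (freq, ((j - k' : Nat) : Int), pvCnt cs k' j) ∧ pvInv freq (pvWin cs k' j) := by
  subst hk
  intro j
  induction j with
  | zero =>
    intro _
    refine ⟨PySem.Dict.empty, ?_, ?_⟩
    · rw [show ((0 : Nat) : Int) = 0 by rfl, PySem.List.pyRange_one_eq_nil le_rfl]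
      simp [pvCnt]
    · simpa [pvWin] using pvInv_empty
  | succ j ih =>
    intro hj1
    have hj : j < cs.length := by omega
    obtain ⟨freq, heq, hinv⟩ := ih (by omega)
    rw [show ((j + 1 : Nat) : Int) = (j : Int) + 1 by push_cast; ring,
      PySem.List.pyRange_one_succ_right (by positivity), List.foldl_append, heq]
    simp only [List.foldl_cons, List.foldl_nil]
    have hcr : PySem.List.pyGetD cs (j : Int) ' ' = cs[j] := by
      rw [PySem.List.pyGetD_natCast, List.getD_eq_getElem _ _ hj]
    have hinv1 : pvInv (freq.insert cs[j] (freq.getD cs[j] 0 + 1))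
        ((cs.take (j + 1)).drop (j - k')) := by
      rw [← pvWin_succ cs k' j hj]
      exact pvInv_add hinv cs[j]
    by_cases h1 : j + 1 < k'
    · -- window still too small: ln < k
      have hlt : ((j : Int) - ((j - k' : Nat) : Int) + 1) < (k' : Int) := by omega
      simp only [substrCountStep, hcr, if_pos hlt]
      refine ⟨freq.insert cs[j] (freq.getD cs[j] 0 + 1), ?_, ?_⟩
      · rw [pvCnt_succ, show ((j + 1 - k' : Nat) : Int) = ((j - k' : Nat) : Int) by omega]
        simp [show ¬ (k' ≤ j + 1) by omega]
      · have e0 : j + 1 - k' = 0 := by omega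
        have e1 : j - k' = 0 := by omega
        unfold pvWin
        rw [e0]
        rw [e1] at hinv1
        exact hinv1
    · by_cases h2 : j + 1 = k'
      · -- window reaches size k exactly: ln = k
        have hnlt : ¬ (((j : Int) - ((j - k' : Nat) : Int) + 1) < (k' : Int)) := by omega
        have hngt : ¬ (((j : Int) - ((j - k' : Nat) : Int) + 1) > (k' : Int)) := by omega
        simp only [substrCountStep, hcr, if_neg hnlt, if_neg hngt]
        have hwin : pvInv (freq.insert cs[j] (freq.getD cs[j] 0 + 1)) (pvWin cs k' (j + 1)) := by
          unfold pvWin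
          rw [show j + 1 - k' = j - k' by omega]
          exact hinv1
        rw [pvCond_eq hwin hk1]
        refine ⟨freq.insert cs[j] (freq.getD cs[j] 0 + 1), ?_, hwin⟩
        rw [pvCnt_succ, show ((j + 1 - k' : Nat) : Int) = ((j - k' : Nat) : Int) by omega]
        by_cases hg : pvGood cs k' j = true <;> simp [hg, show k' ≤ j + 1 by omega]
      · -- window would exceed k: ln > k, evict cs[l]
        have hk'j : k' ≤ j := by omega
        have hnlt : ¬ (((j : Int) - ((j - k' : Nat) : Int) + 1) < (k' : Int)) := by omega
        have hgt : (((j : Int) - ((j - k' : Nat) : Int) + 1) > (k' : Int)) := by omega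
        simp only [substrCountStep, hcr, if_neg hnlt, if_pos hgt]
        have hcl : PySem.List.pyGetD cs ((j - k' : Nat) : Int) ' ' = cs[j - k'] := by
          rw [PySem.List.pyGetD_natCast, List.getD_eq_getElem _ _ (by omega)]
        simp only [hcl]
        have hsplit : (cs.take (j + 1)).drop (j - k') = cs[j - k'] :: pvWin cs k' (j + 1) := by
          have hlt' : j - k' < (cs.take (j + 1)).length := by simp; omega
          rw [List.drop_eq_getElem_cons hlt']
          unfold pvWin
          congr 1
          · simp [List.getElem_take]
          · congr 1
            omega
        rw [hsplit] at hinv1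
        have hinv3 := pvInv_remove hinv1
        set f1 := freq.insert cs[j] (freq.getD cs[j] 0 + 1) with hf1
        set f3 := if (f1.insert cs[j - k'] (f1.getD cs[j - k'] 0 - 1)).getD cs[j - k'] 0 == 0
          then (f1.insert cs[j - k'] (f1.getD cs[j - k'] 0 - 1)).erase cs[j - k']
          else f1.insert cs[j - k'] (f1.getD cs[j - k'] 0 - 1) with hf3
        rw [pvCond_eq hinv3 hk1]
        refine ⟨f3, ?_, hinv3⟩
        rw [pvCnt_succ, show ((j + 1 - k' : Nat) : Int) = ((j - k' : Nat) : Int) + 1 by omega]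
        by_cases hg : pvGood cs k' j = true <;> simp [hg, show k' ≤ j + 1 by omega]

theorem alt_eq_countP (s : String) (k : Int) (hk : ¬ k ≤ 0) :
    substrCount_alt s k =
      ((PySem.List.pyRange 0 ((s.toList.length : Int) - k + 1) 1).countP
        (fun i => PySem.Set.len (PySem.Set.ofList
          (PySem.List.slice s.toList (some i) (some (i + k)))) == k - 1) : Int) := by
  unfold substrCount_alt
  rw [if_neg hk, PySem.Str.len_eq, PySem.List.foldl_count_if]
  ring

theorem spec_of_nonpos (s : String) (k : Int) (hk : k ≤ 0) :
    substrCount s k = substrCount_alt s k := by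
  have hB : substrCount_alt s k = 0 := by
    unfold substrCount_alt
    rw [if_pos hk]
  have hA : ∀ (L : List Int) (st : PySem.Dict Char Int × Int × Int),
      (L.foldl (substrCountStep s.toList k) st).2.2 = st.2.2 := by
    intro L
    induction L with
    | nil => intro st; rfl
    | cons r rest ih =>
      intro st
      rw [List.foldl_cons, ih]
      simp only [substrCountStep]
      split_ifs <;>
        first
        | rfl
        | (exfalso; rename_i hq; have := eq_of_beq hq; omega)
  rw [hB]
  unfold substrCount
  rw [hA]

theorem pvGood_eq_slice (cs : List Char) (k' r : Nat) (hk1 : 1 ≤ k') (hr : k' ≤ r + 1) :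
    pvGood cs k' r = ((PySem.List.dedup ((cs.drop (r + 1 - k')).take k')).length == k' - 1) := by
  unfold pvGood pvWin
  rw [List.drop_take, show r + 1 - (r + 1 - k') = k' by omega]

theorem spec_of_pos (s : String) (k : Int) (k' : Nat) (hk : k = (k' : Int)) (hk1 : 1 ≤ k') :
    substrCount s k = substrCount_alt s k := by
  subst hk
  obtain ⟨freq, heq, -⟩ :=
    pvLoopA s.toList (k' : Int) k' rfl hk1 s.toList.length le_rfl
  unfold substrCount
  rw [PySem.Str.len_eq, heq]
  rw [alt_eq_countP s _ (by omega)]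
  -- reduce B's count over pyRange to a count over List.range
  rw [PySem.List.pyRange_one, List.countP_map]
  have hm : (((s.toList.length : Int) - (k' : Int) + 1 - 0).toNat) = s.toList.length + 1 - k' := by
    omega
  rw [hm]
  set cs := s.toList with hcs
  set n := cs.length with hn
  -- rewrite B's predicate on Nat inputs to match pvGood
  have hpred : ∀ i : Nat,
      ((fun i => PySem.Set.len (PySem.Set.ofList
          (PySem.List.slice cs (some i) (some (i + (k' : Int))))) == (k' : Int) - 1) ∘
        (fun j : Nat => (0 : Int) + (j : Int))) i
        = ((PySem.List.dedup ((cs.drop i).take k')).length == k' - 1) := by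
    intro i
    simp only [Function.comp_apply, zero_add]
    rw [show ((i : Int) + (k' : Int)) = ((i + k' : Nat) : Int) by push_cast; ring,
      PySem.List.slice_natCast, show i + k' - i = k' by omega]
    simp only [PySem.Set.len, PySem.List.dedup]
    by_cases hE : (PySem.Set.ofList ((cs.drop i).take k')).length = k' - 1 <;> simp [hE] <;> omega
  rw [List.countP_congr (fun a _ => by rw [hpred a])]
  -- now shift A's count
  unfold pvCnt
  by_cases hkn : k' - 1 ≤ n
  · have hsplit : n = (k' - 1) + (n + 1 - k') := by omega
    rw [show (List.range n) = List.range ((k' - 1) + (n + 1 - k')) by rw [← hsplit]]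
    rw [List.range_add, List.countP_append, List.countP_map]
    have h0 : (List.range (k' - 1)).countP (fun r => decide (k' ≤ r + 1) && pvGood cs k' r) = 0 := by
      apply List.countP_eq_zero.2
      intro r hr
      simp only [List.mem_range] at hr
      simp [show ¬ (k' ≤ r + 1) by omega]
    rw [h0]
    have h1 : ∀ i ∈ List.range (n + 1 - k'),
        ((fun r => decide (k' ≤ r + 1) && pvGood cs k' r) ∘ (fun x => (k' - 1) + x)) i
          = ((PySem.List.dedup ((cs.drop i).take k')).length == k' - 1) := by
      intro i _
      simp only [Function.comp_apply]
      rw [pvGood_eq_slice cs k' ((k' - 1) + i) hk1 (by omega),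
        show (k' - 1) + i + 1 - k' = i by omega]
      simp [show k' ≤ (k' - 1) + i + 1 by omega]
    rw [List.countP_congr (fun a ha => by rw [h1 a ha])]
    push_cast
    ring
  · have hz1 : (List.range n).countP (fun r => decide (k' ≤ r + 1) && pvGood cs k' r) = 0 := by
      apply List.countP_eq_zero.2
      intro r hr
      simp only [List.mem_range] at hr
      simp [show ¬ (k' ≤ r + 1) by omega]
    rw [hz1, show n + 1 - k' = 0 by omega]
    simp

-- ===== VERDICT (by name: the statement is the Claim_ definition above) =====
theorem substrCount_spec : Claim_equal_substrCount := by
  intro s k _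
  unfold Spec_substrCount
  by_cases hk : k ≤ 0
  · exact spec_of_nonpos s k hk
  · exact spec_of_pos s k k.toNat (by omega) (by omega)
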